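-- pv_equiv track=rewrite | github.com/siuwhat/weibo | weibo/onflask/seg/filter.py | filter_hash
-- ===== SOURCE A (Python) =====
-- def filter_hash(string):
--     str = ""
--     flag = True
--     for s in string:
--         if flag:
--             if s != "#":
--                 str = str + s
--             else:
--                 flag = False
--         else:
--             if s == "#":
--                 flag = True
--     return str
-- ===== SOURCE B (Python) =====
-- def filter_hash(string):
--     # split at every '#'; even-indexed pieces are the text outside #...# pairs
--     return "".join(string.split('#')[::2])
-- ===== Notes on version B (the rewrite author's own statement) =====
-- stated objective: simpler
-- what changed: Replaces the per-character loop with a stateful inside/outside flag by splitting the string at the delimiter and joining the even-indexed segments.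
import Mathlib
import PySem

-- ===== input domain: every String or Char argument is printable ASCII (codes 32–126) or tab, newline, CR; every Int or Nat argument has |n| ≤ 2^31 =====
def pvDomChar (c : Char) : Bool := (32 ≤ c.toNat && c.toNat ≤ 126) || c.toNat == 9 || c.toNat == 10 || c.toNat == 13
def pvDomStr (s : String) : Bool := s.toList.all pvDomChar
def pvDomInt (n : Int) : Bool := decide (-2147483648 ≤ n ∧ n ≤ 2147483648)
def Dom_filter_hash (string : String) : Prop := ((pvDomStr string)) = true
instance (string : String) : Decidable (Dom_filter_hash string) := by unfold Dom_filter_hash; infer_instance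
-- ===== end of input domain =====

-- B replaces A's per-character loop with an inside/outside flag by splitting the
-- string at '#' and joining the even-indexed segments (simpler, no explicit state).


-- ===== PORT A =====
-- literal port of A: a fold over the characters with accumulator (str, flag)
def filter_hash (string : String) : String :=
  let st := string.toList.foldl
    (fun (p : List Char × Bool) s =>
      if p.2 then
        (if s ≠ '#' then (p.1 ++ [s], p.2) else (p.1, false))
      else
        (if s = '#' then (p.1, true) else p))
    ([], true)
  String.mk st.1

-- ===== PORT B =====
-- literal port of B: "".join(string.split('#')[::2])
def filter_hash_alt (string : String) : String :=
  let parts := PySem.Chars.splitOn string.toList ['#']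
  let evens := (PySem.List.slice? parts none none 2).getD []
  String.mk (PySem.Chars.join [] evens)

-- ===== PRECONDITION & SPEC =====
def Spec_filter_hash (string : String) (out : String) : Prop := out = filter_hash_alt string
instance (string : String) (out : String) : Decidable (Spec_filter_hash string out) := by unfold Spec_filter_hash; infer_instance

-- ===== CLAIM (what is proved, stated in full; the proofs are below) =====
def Claim_equal_filter_hash : Prop := ∀ (string : String), Dom_filter_hash string → Spec_filter_hash string (filter_hash string)

-- ===== LEMMAS AND PROOFS =====

-- A's loop body, named for the proofs (filter_hash's fold uses the same lambda)
def stepA : List Char × Bool → Char → List Char × Bool := fun p s =>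
  if p.2 then
    (if s ≠ '#' then (p.1 ++ [s], p.2) else (p.1, false))
  else
    (if s = '#' then (p.1, true) else p)

-- simple structural split at '#' (proof-side model of PySem.Chars.splitOn · ['#'])
def mySplit : List Char → List (List Char)
  | [] => [[]]
  | c :: r => if c = '#' then [] :: mySplit r else (mySplit r).modifyHead (c :: ·)

-- even-/odd-indexed elements
mutual
  def evens {α : Type} : List α → List α
    | [] => []
    | x :: t => x :: odds t
  def odds {α : Type} : List α → List α
    | [] => []
    | _ :: t => evens t
end

-- flag-indexed recursive model of A's loop
mutual
  def specT : List Char → List Char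
    | [] => []
    | c :: r => if c = '#' then specF r else c :: specT r
  def specF : List Char → List Char
    | [] => []
    | c :: r => if c = '#' then specT r else specF r
end

theorem mySplit_ne_nil (l : List Char) : mySplit l ≠ [] := by
  cases l with
  | nil => simp [mySplit]
  | cons c r =>
    simp only [mySplit]
    split
    · simp
    · cases h : mySplit r with
      | nil => exact absurd h (mySplit_ne_nil r)
      | cons a t => simp [h]

theorem go_eq_mySplit (l : List Char) :
    ∀ (fuel : Nat) (cur : List Char) (acc : List (List Char)), l.length ≤ fuel →
      PySem.Chars.splitOn.go ['#'] fuel l cur acc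
        = acc.reverse ++ (mySplit l).modifyHead (cur.reverse ++ ·) := by
  induction l with
  | nil =>
    intro fuel cur acc _
    cases fuel <;> simp [PySem.Chars.splitOn.go, mySplit]
  | cons c r ih =>
    intro fuel cur acc hf
    cases fuel with
    | zero => simp at hf
    | succ f =>
      by_cases hc : c = '#'
      · subst hc
        rw [show PySem.Chars.splitOn.go ['#'] (f+1) ('#' :: r) cur acc
              = PySem.Chars.splitOn.go ['#'] f r [] (cur.reverse :: acc) by
            simp [PySem.Chars.splitOn.go, List.isPrefixOf]]
        rw [ih f [] (cur.reverse :: acc) (by simpa using Nat.le_of_succ_le_succ hf)]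
        cases h : mySplit r with
        | nil => exact absurd h (mySplit_ne_nil r)
        | cons a t => simp [mySplit, h]
      · rw [show PySem.Chars.splitOn.go ['#'] (f+1) (c :: r) cur acc
              = PySem.Chars.splitOn.go ['#'] f r (c :: cur) acc by
            simp [PySem.Chars.splitOn.go, List.isPrefixOf, Ne.symm hc]]
        rw [ih f (c :: cur) acc (Nat.le_of_succ_le_succ hf)]
        cases h : mySplit r with
        | nil => exact absurd h (mySplit_ne_nil r)
        | cons a t => simp [mySplit, hc, h]

theorem splitOn_eq_mySplit (l : List Char) :
    PySem.Chars.splitOn l ['#'] = mySplit l := by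
  have := go_eq_mySplit l (l.length + 1) [] [] (Nat.le_succ _)
  rw [PySem.Chars.splitOn]
  cases h : mySplit l with
  | nil => exact absurd h (mySplit_ne_nil l)
  | cons a t => simpa [h] using this

-- even-indexed selection, characterised from the filterMap shape of slice?
theorem filterMap_two_eq_evens {α : Type} (xs : List α) :
    List.filterMap (fun k => xs[2 * k]?) (List.range ((xs.length + 1) / 2)) = evens xs := by
  match xs with
  | [] => simp [evens]
  | [x] => simp [evens, odds, List.range_succ]
  | x :: y :: r =>
    have hlen : ((x :: y :: r).length + 1) / 2 = ((r.length + 1) / 2) + 1 := by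
      simp; omega
    rw [hlen, List.range_succ_eq_map, List.filterMap_cons, List.filterMap_map]
    have hfun : ((fun k => (x :: y :: r)[2 * k]?) ∘ Nat.succ) = (fun k => r[2 * k]?) := by
      funext k
      show (x :: y :: r)[2 * (k + 1)]? = r[2 * k]?
      rw [show 2 * (k + 1) = 2 * k + 2 by ring]
      simp
    rw [hfun, filterMap_two_eq_evens r]
    simp [evens, odds]

theorem slice?_two_eq_evens {α : Type} (xs : List α) :
    PySem.List.slice? xs none none 2 = some (evens xs) := by
  rw [PySem.List.slice?]
  simp only [PySem.List.sliceIndices]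
  norm_num
  rw [show (fun k : Nat => xs[(2 * (k : Int)).toNat]?) = fun k : Nat => xs[2 * k]? by
    funext k; rw [show ((2 * (k : Int))).toNat = 2 * k by omega]]
  cases xs with
  | nil => simp [evens]
  | cons a t =>
    rw [if_pos (by simp)]
    rw [show (((((a :: t).length : Int)) + 2 - 1) / 2).toNat = ((a :: t).length + 1) / 2 by
      rw [show (((a :: t).length : Int) + 2 - 1) = (((a :: t).length + 1 : Nat) : Int) by
        push_cast; ring]
      rw [show (2 : Int) = ((2 : Nat) : Int) by rfl, ← Int.natCast_div, Int.toNat_natCast]]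
    exact filterMap_two_eq_evens (a :: t)

-- A's fold computes specT
theorem foldl_eq_spec (cs : List Char) : ∀ (acc : List Char) (b : Bool),
    (cs.foldl stepA (acc, b)).1 = acc ++ (if b then specT cs else specF cs) := by
  induction cs with
  | nil => intro acc b; cases b <;> simp [specT, specF]
  | cons c r ih =>
    intro acc b
    rw [List.foldl_cons]
    cases b with
    | true =>
      by_cases hc : c = '#'
      · rw [show stepA (acc, true) c = (acc, false) by simp [stepA, hc]]
        rw [ih acc false]
        simp [specT, hc]
      · rw [show stepA (acc, true) c = (acc ++ [c], true) by simp [stepA, hc]]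
        rw [ih (acc ++ [c]) true]
        simp [specT, hc]
    | false =>
      by_cases hc : c = '#'
      · rw [show stepA (acc, false) c = (acc, true) by simp [stepA, hc]]
        rw [ih acc true]
        simp [specF, hc]
      · rw [show stepA (acc, false) c = (acc, false) by simp [stepA, hc]]
        rw [ih acc false]
        simp [specF, hc]

-- B's pieces flatten to specT / specF
theorem flatten_evens_mySplit (cs : List Char) :
    (evens (mySplit cs)).flatten = specT cs ∧ (odds (mySplit cs)).flatten = specF cs := by
  induction cs with
  | nil => simp [mySplit, evens, odds, specT, specF]
  | cons c r ih =>
    obtain ⟨ihE, ihO⟩ := ih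
    by_cases hc : c = '#'
    · subst hc
      refine ⟨?_, ?_⟩
      · rw [show mySplit ('#' :: r) = [] :: mySplit r by simp [mySplit]]
        rw [show specT ('#' :: r) = specF r by simp [specT]]
        cases h : mySplit r with
        | nil => exact absurd h (mySplit_ne_nil r)
        | cons a t => rw [h] at ihO; simpa [evens, odds] using ihO
      · rw [show mySplit ('#' :: r) = [] :: mySplit r by simp [mySplit]]
        rw [show specF ('#' :: r) = specT r by simp [specF]]
        simpa [odds] using ihE
    · cases h : mySplit r with
      | nil => exact absurd h (mySplit_ne_nil r)
      | cons a t =>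
        have hm : mySplit (c :: r) = (c :: a) :: t := by simp [mySplit, hc, h]
        rw [h] at ihE ihO
        refine ⟨?_, ?_⟩
        · rw [hm, show specT (c :: r) = c :: specT r by simp [specT, hc]]
          simp only [evens, List.flatten_cons] at ihE ⊢
          rw [← ihE]; simp
        · rw [hm, show specF (c :: r) = specF r by simp [specF, hc]]
          simpa [odds] using ihO

theorem join_nil_eq_flatten (l : List (List Char)) :
    PySem.Chars.join [] l = l.flatten := by
  induction l with
  | nil => simp [PySem.Chars.join, List.intercalate]
  | cons a t ih =>
    cases t with
    | nil => simp [PySem.Chars.join, List.intercalate]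
    | cons b u =>
      simp only [PySem.Chars.join, List.intercalate] at ih ⊢
      simp [List.intersperse] at ih ⊢
      exact ih

-- ===== VERDICT (by name: the statement is the Claim_ definition above) =====
theorem filter_hash_spec : Claim_equal_filter_hash := by
  intro s _
  show filter_hash s = filter_hash_alt s
  rw [filter_hash, filter_hash_alt]
  rw [splitOn_eq_mySplit, slice?_two_eq_evens]
  simp only [Option.getD_some]
  rw [join_nil_eq_flatten, (flatten_evens_mySplit s.toList).1]
  congr 1
  exact foldl_eq_spec s.toList [] true
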